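-- pv_equiv track=rewrite | github.com/issdandavis/SCBE-AETHERMOORE | scripts/train_art_lora_colab.py | ordered_quality_keys
-- ===== SOURCE A (Python) =====
-- def ordered_quality_keys(quality_weights: dict[str, int], observed: set[str]) -> list[str]:
--     keys: list[str] = []
--     for key in quality_weights:
--         if key in observed:
--             keys.append(key)
--     for key in sorted(observed):
--         if key not in keys:
--             keys.append(key)
--     return keys
-- ===== SOURCE B (Python) =====
-- def ordered_quality_keys(quality_weights: dict[str, int], observed: set[str]) -> list[str]:
--     index = {key: i for i, key in enumerate(quality_weights)}
--     n = len(index)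
--     return sorted(observed, key=lambda key: (index.get(key, n), key))
-- ===== Notes on version B (the rewrite author's own statement) =====
-- stated objective: idiomatic
-- what changed: Replaces A's two sequential membership-scan append loops with building an index dict of each weight key's position once and a single keyed sort of observed using the composite key (position-or-len, key).
import Mathlib
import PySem

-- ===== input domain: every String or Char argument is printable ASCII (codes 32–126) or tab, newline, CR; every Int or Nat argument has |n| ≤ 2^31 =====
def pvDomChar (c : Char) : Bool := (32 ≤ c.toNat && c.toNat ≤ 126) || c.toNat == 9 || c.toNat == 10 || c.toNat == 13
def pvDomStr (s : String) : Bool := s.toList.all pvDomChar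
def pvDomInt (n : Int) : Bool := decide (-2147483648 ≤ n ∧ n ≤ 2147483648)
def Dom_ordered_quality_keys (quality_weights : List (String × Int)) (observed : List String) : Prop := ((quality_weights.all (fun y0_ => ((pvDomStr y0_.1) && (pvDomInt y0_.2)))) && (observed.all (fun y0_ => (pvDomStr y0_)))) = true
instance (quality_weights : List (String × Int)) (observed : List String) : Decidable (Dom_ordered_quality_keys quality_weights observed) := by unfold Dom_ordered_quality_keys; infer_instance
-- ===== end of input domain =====

-- B replaces A's two sequential membership-scan append loops by building a position-index dict once
-- and doing a single keyed sort of observed (idiomatic; similar cost at these sizes).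

-- ===== PORT A =====
def ordered_quality_keys (quality_weights : List (String × Int)) (observed : List String) : List String :=
  -- 'for key in quality_weights' iterates the dict's keys: the fst-projection of the association list (keys unique, Pre_)
  let keys : List String :=
    (quality_weights.map Prod.fst).foldl
      (fun keys key => if key ∈ observed then keys ++ [key] else keys) []
  -- 'for key in sorted(observed)'
  (PySem.List.sorted observed (fun x => x)).foldl
    (fun keys key => if key ∈ keys then keys else keys ++ [key]) keys

-- ===== PORT B =====
def ordered_quality_keys_alt (quality_weights : List (String × Int)) (observed : List String) : List String :=
  -- index = {key: i for i, key in enumerate(quality_weights)}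
  let index : PySem.Dict String Int :=
    PySem.Dict.ofList ((PySem.List.enumerate (quality_weights.map Prod.fst)).map (fun p => (p.2, p.1)))
  -- n = len(index)
  let n : Int := index.size
  -- sorted(observed, key=lambda key: (index.get(key, n), key)); the Python tuple compares
  -- lexicographically, ported as the Lex order on Int × String
  PySem.List.sorted observed (fun key => toLex (index.getD key n, key))

-- ===== PRECONDITION & SPEC =====
-- Pre_ admits exactly the valid encodings of A's Python arguments — quality_weights encodes a dict
-- (keys unique) and observed a set (elements distinct) — so it excludes no actual Python input.
def Pre_ordered_quality_keys (quality_weights : List (String × Int)) (observed : List String) : Prop :=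
  (quality_weights.map Prod.fst).Nodup ∧ observed.Nodup
instance (quality_weights : List (String × Int)) (observed : List String) : Decidable (Pre_ordered_quality_keys quality_weights observed) := by unfold Pre_ordered_quality_keys; infer_instance

def pvWitness_ordered_quality_keys : (List (String × Int)) × List String :=
  ([("colorfulness", 3), ("sharpness", 1)], ["sharpness", "contrast", "colorfulness"])

def Spec_ordered_quality_keys (quality_weights : List (String × Int)) (observed : List String) (out : List String) : Prop := out = ordered_quality_keys_alt quality_weights observed
instance (quality_weights : List (String × Int)) (observed : List String) (out : List String) : Decidable (Spec_ordered_quality_keys quality_weights observed out) := by unfold Spec_ordered_quality_keys; infer_instance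

-- ===== CLAIM (what is proved, stated in full; the proofs are below) =====
def Claim_equal_ordered_quality_keys : Prop := ∀ (quality_weights : List (String × Int)) (observed : List String), Dom_ordered_quality_keys quality_weights observed → Pre_ordered_quality_keys quality_weights observed → Spec_ordered_quality_keys quality_weights observed (ordered_quality_keys quality_weights observed)

-- ===== LEMMAS AND PROOFS =====

-- The canonical form both programs compute: weight keys that were observed, in weight order,
-- then the remaining observed keys in sorted order.
def pvCanon (quality_weights : List (String × Int)) (observed : List String) : List String :=
  (quality_weights.map Prod.fst).filter (fun x => decide (x ∈ observed)) ++
    (PySem.List.sorted observed (fun x => x)).filter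
      (fun k => decide (k ∉ quality_weights.map Prod.fst))

-- A's second loop: appending each element of a duplicate-free list unless already present.
lemma pv_foldl_dedup (s : List String) (acc : List String) (hs : s.Nodup) :
    s.foldl (fun ks k => if k ∈ ks then ks else ks ++ [k]) acc
      = acc ++ s.filter (fun k => decide (k ∉ acc)) := by
  induction s generalizing acc with
  | nil => simp
  | cons k t ih =>
    rcases List.nodup_cons.mp hs with ⟨hk, ht⟩
    by_cases h : k ∈ acc
    · simpa [List.foldl_cons, h] using ih acc ht
    · have hfc : t.filter (fun x => decide (x ∉ acc ++ [k])) = t.filter (fun x => decide (x ∉ acc)) :=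
        List.filter_congr (fun x hx => by
          have hxk : x ≠ k := fun e => hk (e ▸ hx)
          simp [List.mem_append, hxk])
      simp only [List.foldl_cons, if_neg h]
      rw [ih (acc ++ [k]) ht, hfc]
      simp [h, List.append_assoc]

lemma pvA_eq (quality_weights : List (String × Int)) (observed : List String)
    (hobs : observed.Nodup) :
    ordered_quality_keys quality_weights observed = pvCanon quality_weights observed := by
  have hSnodup : (PySem.List.sorted observed (fun x : String => x)).Nodup :=
    (PySem.List.sorted_perm observed (fun x : String => x) false).nodup_iff.mpr hobs
  simp only [ordered_quality_keys, pvCanon]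
  rw [PySem.List.foldl_append_ite_eq_filter (fun key => key ∈ observed) (quality_weights.map Prod.fst) [],
    pv_foldl_dedup _ _ hSnodup]
  rw [List.nil_append]
  congr 1
  apply List.filter_congr
  intro x hx
  have hxo : x ∈ observed := (PySem.List.mem_sorted observed _ false x).mp hx
  by_cases hxw : x ∈ quality_weights.map Prod.fst
  · simp [List.mem_filter, hxw, hxo]
  · simp [List.mem_filter, hxw]

lemma pvB_eq (quality_weights : List (String × Int)) (observed : List String)
    (hwk : (quality_weights.map Prod.fst).Nodup) (hobs : observed.Nodup) :
    ordered_quality_keys_alt quality_weights observed = pvCanon quality_weights observed := by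
  simp only [ordered_quality_keys_alt]
  set wk := quality_weights.map Prod.fst with hwkdef
  set pairs := (PySem.List.enumerate wk 0).map (fun p => (p.2, p.1)) with hpairs
  set idx := PySem.Dict.ofList pairs with hidx
  set n : Int := (idx.size : Int) with hn
  set S := PySem.List.sorted observed (fun x : String => x) with hSdef
  -- the index dict is exactly the enumeration pairs
  have hmapfst : pairs.map (fun p => p.1) = wk := by
    simp [hpairs, List.map_map, Function.comp_def, PySem.List.map_snd_enumerate]
  have hitems : idx.items = pairs := by
    rw [hidx]
    show (List.foldl (fun acc p => acc.insert p.1 p.2) PySem.Dict.empty pairs).items = pairs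
    rw [PySem.Dict.items_foldl_insert_fresh pairs (fun p => p.1) (fun p => p.2) PySem.Dict.empty
      (by intro a _; simp [PySem.Dict.contains_empty]) (by rw [hmapfst]; exact hwk)]
    simp [PySem.Dict.empty]
  have hkeys : idx.keys = wk := by
    simp only [PySem.Dict.keys, hitems]
    exact hmapfst
  have hkeysnd : idx.keys.Nodup := by rw [hkeys]; exact hwk
  have hnlen : n = (wk.length : Int) := by
    simp [hn, PySem.Dict.size, hitems, hpairs, List.length_map, PySem.List.length_enumerate]
  have hgetD_mem : ∀ (j : Nat) (hj : j < wk.length), idx.getD wk[j] n = (j : Int) := by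
    intro j hj
    have hmem : ((wk[j] : String), (j : Int)) ∈ pairs := by
      rw [hpairs]
      refine List.mem_map.mpr ⟨((0 : Int) + (j : Nat), wk[j]), ?_, by simp⟩
      exact (PySem.List.mem_enumerate_iff wk 0 _).mpr ⟨j, hj, rfl⟩
    exact PySem.Dict.getD_of_mem_items idx (by rw [hitems]; exact hmem) hkeysnd n
  have hgetD_not : ∀ x : String, x ∉ wk → idx.getD x n = n := by
    intro x hx
    apply PySem.Dict.getD_of_not_contains
    rw [PySem.Dict.contains_eq_decide_mem_keys, hkeys]
    simpa using hx
  -- facts about S = sorted(observed)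
  have hSperm : S.Perm observed := PySem.List.sorted_perm observed _ false
  have hSnodup : S.Nodup := hSperm.nodup_iff.mpr hobs
  have hSmem : ∀ x, x ∈ S ↔ x ∈ observed := fun x => PySem.List.mem_sorted observed _ false x
  have hFmem : ∀ x, x ∈ wk.filter (fun x => decide (x ∈ observed)) ↔ x ∈ wk ∧ x ∈ observed := by
    intro x; rw [List.mem_filter]; simp
  have hRmem : ∀ x, x ∈ S.filter (fun k => decide (k ∉ wk)) ↔ x ∈ observed ∧ x ∉ wk := by
    intro x; rw [List.mem_filter]; simp [hSmem]
  have hTnodup : (wk.filter (fun x => decide (x ∈ observed)) ++ S.filter (fun k => decide (k ∉ wk))).Nodup := by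
    refine (hwk.filter _).append (hSnodup.filter _) ?_
    intro a haF haR
    exact ((hRmem a).mp haR).2 ((hFmem a).mp haF).1
  show PySem.List.sorted observed (fun key => toLex (idx.getD key n, key))
      = wk.filter (fun x => decide (x ∈ observed)) ++ S.filter (fun k => decide (k ∉ wk))
  apply PySem.List.sorted_eq_of_perm_of_pairwise_lt
  · rw [List.perm_ext_iff_of_nodup hTnodup hobs]
    intro a
    rw [List.mem_append, hFmem a, hRmem a]
    tauto
  · -- the composite key grows strictly along the concatenation
    rw [List.pairwise_append]
    refine ⟨?_, ?_, ?_⟩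
    · -- inside the weighted part: positions strictly increase along wk
      have hwkpair : wk.Pairwise
          (fun a b => toLex ((idx.getD a n : Int), a) < toLex (idx.getD b n, b)) := by
        rw [List.pairwise_iff_getElem]
        intro i j hi hj hij
        refine Prod.Lex.toLex_lt_toLex.mpr (Or.inl ?_)
        show idx.getD wk[i] n < idx.getD wk[j] n
        rw [hgetD_mem i hi, hgetD_mem j hj]
        exact_mod_cast hij
      exact List.Pairwise.sublist List.filter_sublist hwkpair
    · -- inside the rest: every key gets position n, names strictly increase
      have hSlt : S.Pairwise (fun a b => a < b) := by
        have h1 : S.Pairwise (fun a b => a ≤ b) :=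
          PySem.List.sorted_pairwise (κ := String) observed (fun x : String => x)
        have h2 : S.Pairwise (fun a b => a ≠ b) := hSnodup
        exact (h1.and h2).imp (fun h => lt_of_le_of_ne h.1 h.2)
      have hRlt : (S.filter (fun k => decide (k ∉ wk))).Pairwise (fun a b => a < b) :=
        List.Pairwise.sublist List.filter_sublist hSlt
      refine List.Pairwise.imp_of_mem ?_ hRlt
      intro a b ha hb hab
      refine Prod.Lex.toLex_lt_toLex.mpr (Or.inr ?_)
      show idx.getD a n = idx.getD b n ∧ a < b
      rw [hgetD_not a ((hRmem a).mp ha).2, hgetD_not b ((hRmem b).mp hb).2]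
      exact ⟨rfl, hab⟩
    · -- across: every weighted position is < n
      intro a haF b hbR
      obtain ⟨hawk, -⟩ := (hFmem a).mp haF
      obtain ⟨i, hi, hieq⟩ := List.mem_iff_getElem.mp hawk
      refine Prod.Lex.toLex_lt_toLex.mpr (Or.inl ?_)
      show idx.getD a n < idx.getD b n
      rw [← hieq, hgetD_mem i hi, hgetD_not b ((hRmem b).mp hbR).2, hnlen]
      exact_mod_cast hi

-- ===== VERDICT (by name: the statement is the Claim_ definition above) =====
theorem ordered_quality_keys_spec : Claim_equal_ordered_quality_keys := by
  intro quality_weights observed _hdom hpre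
  unfold Spec_ordered_quality_keys
  rw [pvA_eq quality_weights observed hpre.2, pvB_eq quality_weights observed hpre.1 hpre.2]
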